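-- pv_equiv track=rewrite | github.com/sijun-kevin-hu/clash_predict | app.py | _pretty_feature_name
-- ===== SOURCE A (Python) =====
-- def _pretty_feature_name(feat: str) -> str:
--     """Turn a raw feature column name into a readable label."""
--     feat = feat.replace("_", " ")
--     for prefix in ("team norm level ", "opp norm level ",
--                     "team support norm level ", "opp support norm level "):
--         if feat.startswith(prefix):
--             card = feat[len(prefix):]
--             side = "You" if feat.startswith("team") else "Opp"
--             kind = "support " if "support" in prefix else ""
--             return f"{side}: {kind}{card} level"
--     for prefix in ("team ", "opp "):
--         if feat.startswith(prefix) and feat.endswith(" count"):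
--             role = feat[len(prefix):-len(" count")]
--             side = "You" if prefix == "team " else "Opp"
--             return f"{side}: {role} count"
--     return feat
-- ===== SOURCE B (Python) =====
-- def _pretty_feature_name(feat: str) -> str:
--     """Turn a raw feature column name into a readable label (token-based)."""
--     words = feat.replace("_", " ").split(" ")
--     if words[0] == "team":
--         side = "You"
--     elif words[0] == "opp":
--         side = "Opp"
--     else:
--         return " ".join(words)
--     if words[1:4] == ["support", "norm", "level"] and len(words) > 4:
--         return f"{side}: support {' '.join(words[4:])} level"
--     if words[1:3] == ["norm", "level"] and len(words) > 3:
--         return f"{side}: {' '.join(words[3:])} level"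
--     if len(words) > 1 and words[-1] == "count":
--         return f"{side}: {' '.join(words[1:-1])} count"
--     return " ".join(words)
-- ===== Notes on version B (the rewrite author's own statement) =====
-- stated objective: idiomatic
-- what changed: B splits the underscore-normalised name into space-separated tokens once and pattern-matches on the token list (first token for the side, token slices for the norm-level patterns, last token for the count pattern), instead of A's repeated string prefix/suffix scans and index slicing.
import Mathlib
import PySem

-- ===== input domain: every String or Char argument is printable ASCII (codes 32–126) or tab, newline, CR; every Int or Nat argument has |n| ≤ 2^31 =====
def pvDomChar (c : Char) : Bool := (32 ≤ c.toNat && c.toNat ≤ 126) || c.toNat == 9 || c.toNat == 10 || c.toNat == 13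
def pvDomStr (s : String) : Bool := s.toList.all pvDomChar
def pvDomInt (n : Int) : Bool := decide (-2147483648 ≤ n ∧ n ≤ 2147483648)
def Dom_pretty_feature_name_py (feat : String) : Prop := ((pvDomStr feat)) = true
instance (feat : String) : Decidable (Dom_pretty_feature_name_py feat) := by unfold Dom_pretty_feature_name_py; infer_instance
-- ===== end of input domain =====

-- B re-implements A's prefix-scan-and-slice logic by splitting the name into space-separated
-- tokens once and pattern-matching on the token list (objective: alternative; same cost).

-- word literals shared by both ports (the Python string literals, as char lists)
def wTeam : List Char := ['t', 'e', 'a', 'm']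
def wOpp : List Char := ['o', 'p', 'p']
def wNorm : List Char := ['n', 'o', 'r', 'm']
def wLevel : List Char := ['l', 'e', 'v', 'e', 'l']
def wSupport : List Char := ['s', 'u', 'p', 'p', 'o', 'r', 't']
def wCount : List Char := ['c', 'o', 'u', 'n', 't']

-- ===== PORT A =====
-- body of the first loop's return: f"{side}: {kind}{card} level"
def prettyA_hit1 (f p : List Char) : List Char :=
  let card := PySem.Chars.slice f (some (PySem.Chars.len p)) none
  let side := if PySem.Chars.startswith f wTeam then ['Y', 'o', 'u'] else ['O', 'p', 'p']
  let kind := if PySem.Chars.isIn wSupport p then wSupport ++ [' '] else []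
  side ++ [':', ' '] ++ kind ++ card ++ [' '] ++ wLevel

-- "for prefix in (…): if feat.startswith(prefix): return …"
def prettyA_loop1 (f : List Char) : List (List Char) → Option (List Char)
  | [] => none
  | p :: ps => if PySem.Chars.startswith f p then some (prettyA_hit1 f p) else prettyA_loop1 f ps

-- body of the second loop's return: f"{side}: {role} count"
def prettyA_hit2 (f p : List Char) : List Char :=
  let role := PySem.Chars.slice f (some (PySem.Chars.len p)) (some (-6))
  let side := if p = wTeam ++ [' '] then ['Y', 'o', 'u'] else ['O', 'p', 'p']
  side ++ [':', ' '] ++ role ++ [' '] ++ wCount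

-- "for prefix in ("team ", "opp "): if feat.startswith(prefix) and feat.endswith(" count"): return …"
def prettyA_loop2 (f : List Char) : List (List Char) → Option (List Char)
  | [] => none
  | p :: ps =>
    if PySem.Chars.startswith f p && PySem.Chars.endswith f ([' '] ++ wCount) then
      some (prettyA_hit2 f p)
    else prettyA_loop2 f ps

def prettyA_body (f : List Char) : List Char :=
  match prettyA_loop1 f
      [wTeam ++ [' '] ++ wNorm ++ [' '] ++ wLevel ++ [' '],
       wOpp ++ [' '] ++ wNorm ++ [' '] ++ wLevel ++ [' '],
       wTeam ++ [' '] ++ wSupport ++ [' '] ++ wNorm ++ [' '] ++ wLevel ++ [' '],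
       wOpp ++ [' '] ++ wSupport ++ [' '] ++ wNorm ++ [' '] ++ wLevel ++ [' ']] with
  | some r => r
  | none =>
    match prettyA_loop2 f [wTeam ++ [' '], wOpp ++ [' ']] with
    | some r => r
    | none => f

def pretty_feature_name_py (feat : String) : String :=
  String.ofList (prettyA_body (PySem.Chars.replace feat.toList ['_'] [' ']))

-- ===== PORT B =====
-- the three token-pattern branches shared by the "team"/"opp" sides of Source B
def prettyB_rest (ws : List (List Char)) (side : List Char) : List Char :=
  if PySem.List.slice ws (some 1) (some 4) = [wSupport, wNorm, wLevel] ∧ 4 < ws.length then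
    side ++ [':', ' '] ++ wSupport ++ [' ']
      ++ PySem.Chars.join [' '] (PySem.List.slice ws (some 4) none) ++ [' '] ++ wLevel
  else if PySem.List.slice ws (some 1) (some 3) = [wNorm, wLevel] ∧ 3 < ws.length then
    side ++ [':', ' ']
      ++ PySem.Chars.join [' '] (PySem.List.slice ws (some 3) none) ++ [' '] ++ wLevel
  else if 1 < ws.length ∧ PySem.List.pyGetD ws (-1) [] = wCount then
    side ++ [':', ' ']
      ++ PySem.Chars.join [' '] (PySem.List.slice ws (some 1) (some (-1))) ++ [' '] ++ wCount
  else PySem.Chars.join [' '] ws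

def prettyB_body (f : List Char) : List Char :=
  let ws := (PySem.Chars.split? f [' ']).getD []   -- .split(" "): sep ≠ "", so split? is `some`
  if PySem.List.pyGetD ws 0 [] = wTeam then prettyB_rest ws ['Y', 'o', 'u']
  else if PySem.List.pyGetD ws 0 [] = wOpp then prettyB_rest ws ['O', 'p', 'p']
  else PySem.Chars.join [' '] ws

def pretty_feature_name_py_alt (feat : String) : String :=
  String.ofList (prettyB_body (PySem.Chars.replace feat.toList ['_'] [' ']))

-- ===== PRECONDITION & SPEC =====
def Spec_pretty_feature_name_py (feat : String) (out : String) : Prop := out = pretty_feature_name_py_alt feat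
instance (feat : String) (out : String) : Decidable (Spec_pretty_feature_name_py feat out) := by unfold Spec_pretty_feature_name_py; infer_instance

-- ===== CLAIM (what is proved, stated in full; the proofs are below) =====
def Claim_equal_pretty_feature_name_py : Prop := ∀ (feat : String), Dom_pretty_feature_name_py feat → Spec_pretty_feature_name_py feat (pretty_feature_name_py feat)

-- ===== LEMMAS AND PROOFS =====

def splitSp : List Char → List (List Char)
  | [] => [[]]
  | c :: r => if c = ' ' then [] :: splitSp r else (c :: (splitSp r).headI) :: (splitSp r).tail
theorem splitSp_ne_nil (s : List Char) : splitSp s ≠ [] := by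
  cases s with
  | nil => simp [splitSp]
  | cons c r => simp only [splitSp]; split_ifs <;> simp
theorem splitSp_cons (s : List Char) : splitSp s = (splitSp s).headI :: (splitSp s).tail := by
  cases h : splitSp s with
  | nil => exact absurd h (splitSp_ne_nil s)
  | cons a l => simp
theorem go_spec : ∀ (fuel : Nat) (l cur : List Char) (acc : List (List Char)), l.length ≤ fuel →
    PySem.Chars.splitOn.go [' '] fuel l cur acc
      = acc.reverse ++ (cur.reverse ++ (splitSp l).headI) :: (splitSp l).tail := by
  intro fuel
  induction fuel with
  | zero =>
    intro l cur acc h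
    have : l = [] := by cases l <;> simp_all
    subst this
    rw [PySem.Chars.splitOn.go.eq_def]
    simp [splitSp]
  | succ n ih =>
    intro l cur acc h
    cases l with
    | nil => rw [PySem.Chars.splitOn.go.eq_def]; simp [splitSp]
    | cons c rest =>
      rw [PySem.Chars.splitOn.go.eq_def]
      simp only []
      by_cases hc : c = ' '
      · subst hc
        have hpre : List.isPrefixOf [' '] (' ' :: rest) = true := by
          simp
        simp only [hpre, if_pos]
        have hd : List.drop [' '].length (' ' :: rest) = rest := by simp
        rw [hd, ih rest [] (cur.reverse :: acc) (by simpa using Nat.le_of_succ_le_succ (by simpa using h))]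
        simp [splitSp]
        rw [← splitSp_cons]
      · rw [if_neg (by simp [List.isPrefixOf_iff_prefix, List.cons_prefix_iff]; intro hh; exact hc hh)]
        rw [ih rest (c :: cur) acc (by simpa using Nat.le_of_succ_le_succ (by simpa using h))]
        simp [splitSp, hc]
theorem splitOn_space (s : List Char) : PySem.Chars.splitOn s [' '] = splitSp s := by
  unfold PySem.Chars.splitOn
  rw [go_spec (s.length + 1) s [] [] (by omega)]
  simp
  rw [← splitSp_cons]

theorem mem_splitSp_no_space (s : List Char) : ∀ w ∈ splitSp s, ' ' ∉ w := by
  induction s with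
  | nil => intro w hw; simp [splitSp] at hw; simp [hw]
  | cons c r ih =>
    intro w hw
    simp only [splitSp] at hw
    by_cases hc : c = ' '
    · rw [if_pos hc] at hw
      rcases List.mem_cons.mp hw with h | h
      · simp [h]
      · exact ih w h
    · rw [if_neg hc] at hw
      rcases List.mem_cons.mp hw with h | h
      · subst h
        intro hmem
        rcases List.mem_cons.mp hmem with h' | h'
        · exact hc h'.symm
        · exact ih _ (by rw [splitSp_cons r]; exact List.mem_cons_self ..) h'
      · exact ih w (by rw [splitSp_cons r]; exact List.mem_cons_of_mem _ h)

theorem join_splitSp (s : List Char) : PySem.Chars.join [' '] (splitSp s) = s := by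
  induction s with
  | nil => rw [show splitSp [] = [[]] from rfl, PySem.Chars.join_singleton]
  | cons c r ih =>
    by_cases hc : c = ' '
    · subst hc
      have h1 : splitSp (' ' :: r) = [] :: splitSp r := by simp [splitSp]
      rw [h1, splitSp_cons r, PySem.Chars.join_cons_cons, ← splitSp_cons r]
      simp [ih]
    · simp only [splitSp, if_neg hc]
      rw [splitSp_cons r] at ih
      cases ht : (splitSp r).tail with
      | nil =>
        rw [ht] at ih
        rw [PySem.Chars.join_singleton] at ih ⊢
        simp [ih]
      | cons q l =>
        rw [ht] at ih
        rw [PySem.Chars.join_cons_cons] at ih ⊢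
        simp only [List.cons_append, List.append_assoc] at ih ⊢
        rw [ih]

theorem join_append (P : List (List Char)) : ∀ (Q : List (List Char)), P ≠ [] → Q ≠ [] →
    PySem.Chars.join [' '] (P ++ Q)
      = PySem.Chars.join [' '] P ++ ' ' :: PySem.Chars.join [' '] Q := by
  induction P with
  | nil => intro Q h; exact absurd rfl h
  | cons p P ih =>
    intro Q _ hQ
    cases P with
    | nil =>
      cases Q with
      | nil => exact absurd rfl hQ
      | cons q l => rw [List.singleton_append, PySem.Chars.join_cons_cons, PySem.Chars.join_singleton]; simp
    | cons p2 P2 =>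
      have e1 : (p :: p2 :: P2) ++ Q = p :: ((p2 :: P2) ++ Q) := by simp
      have e2 : (p2 :: P2) ++ Q = p2 :: (P2 ++ Q) := by simp
      rw [e1, e2, PySem.Chars.join_cons_cons, ← e2, ih Q (by simp) hQ, PySem.Chars.join_cons_cons]
      simp

theorem prefix_sep (p : List Char) : ∀ (x q y : List Char), ' ' ∉ p → ' ' ∉ x →
    ((p ++ ' ' :: q) <+: (x ++ ' ' :: y) ↔ p = x ∧ q <+: y) := by
  induction p with
  | nil =>
    intro x q y _ hx
    cases x with
    | nil => simp [List.cons_prefix_cons]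
    | cons a x' =>
      simp only [List.nil_append, List.cons_append, List.cons_prefix_cons]
      constructor
      · rintro ⟨h1, _⟩
        exact absurd (h1 ▸ List.mem_cons_self : ' ' ∈ a :: x') hx
      · rintro ⟨h, _⟩; exact absurd h (by simp)
  | cons b p' ih =>
    intro x q y hp hx
    cases x with
    | nil =>
      simp only [List.cons_append, List.nil_append, List.cons_prefix_cons]
      constructor
      · rintro ⟨h1, _⟩
        exact absurd (h1 ▸ List.mem_cons_self : ' ' ∈ b :: p') hp
      · rintro ⟨h, _⟩; exact absurd h (by simp)
    | cons a x' =>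
      simp only [List.cons_append, List.cons_prefix_cons]
      rw [ih x' q y (fun h => hp (List.mem_cons_of_mem _ h)) (fun h => hx (List.mem_cons_of_mem _ h))]
      constructor
      · rintro ⟨h1, h2, h3⟩; exact ⟨by rw [h1, h2], h3⟩
      · rintro ⟨h1, h3⟩
        obtain ⟨rfl, rfl⟩ : b = a ∧ p' = x' := by
          exact ⟨(List.cons.injEq .. ▸ h1 : _ ∧ _).1, (List.cons.injEq .. ▸ h1 : _ ∧ _).2⟩
        exact ⟨rfl, rfl, h3⟩

theorem startswith_words (P : List (List Char)) : ∀ (W : List (List Char)), P ≠ [] → W ≠ [] →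
    (∀ w ∈ P, ' ' ∉ w) → (∀ w ∈ W, ' ' ∉ w) →
    ((PySem.Chars.join [' '] P ++ [' ']) <+: PySem.Chars.join [' '] W
      ↔ ∃ W', W = P ++ W' ∧ W' ≠ []) := by
  induction P with
  | nil => intro W h; exact absurd rfl h
  | cons p P' ih =>
    intro W _ hWne hPf hWf
    obtain ⟨w, W1, rfl⟩ : ∃ w W1, W = w :: W1 := by
      cases W with | nil => exact absurd rfl hWne | cons w W1 => exact ⟨w, W1, rfl⟩
    have hpf : ' ' ∉ p := hPf p (List.mem_cons_self ..)
    have hwf : ' ' ∉ w := hWf w (List.mem_cons_self ..)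
    cases P' with
    | nil =>
      rw [PySem.Chars.join_singleton]
      cases W1 with
      | nil =>
        rw [PySem.Chars.join_singleton]
        constructor
        · intro hpre
          exfalso
          exact hwf (hpre.mem (by simp))
        · rintro ⟨W', hW', hne⟩
          simp only [List.singleton_append, List.cons.injEq] at hW'
          exact absurd hW'.2.symm hne
      | cons w2 W2 =>
        rw [PySem.Chars.join_cons_cons]
        have : w ++ [' '] ++ PySem.Chars.join [' '] (w2 :: W2)
            = w ++ ' ' :: PySem.Chars.join [' '] (w2 :: W2) := by simp
        rw [this, show p ++ [' '] = p ++ ' ' :: ([] : List Char) from rfl,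
          prefix_sep p w [] _ hpf hwf]
        constructor
        · rintro ⟨rfl, _⟩; exact ⟨w2 :: W2, rfl, by simp⟩
        · rintro ⟨W', hW', _⟩
          simp only [List.singleton_append, List.cons.injEq] at hW'
          exact ⟨hW'.1.symm, by simp⟩
    | cons p2 P2 =>
      rw [PySem.Chars.join_cons_cons]
      have e1 : p ++ [' '] ++ PySem.Chars.join [' '] (p2 :: P2) ++ [' ']
          = p ++ ' ' :: (PySem.Chars.join [' '] (p2 :: P2) ++ [' ']) := by simp
      rw [e1]
      cases W1 with
      | nil =>
        rw [PySem.Chars.join_singleton]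
        constructor
        · intro hpre
          exfalso
          exact hwf (hpre.mem (by simp))
        · rintro ⟨W', hW', hne⟩
          have : ([w] : List (List Char)).length = (p :: p2 :: P2 ++ W').length := by rw [← hW']
          simp at this
      | cons w2 W2 =>
        rw [PySem.Chars.join_cons_cons]
        have e2 : w ++ [' '] ++ PySem.Chars.join [' '] (w2 :: W2)
            = w ++ ' ' :: PySem.Chars.join [' '] (w2 :: W2) := by simp
        rw [e2, prefix_sep p w _ _ hpf hwf]
        have hpre2 := ih (w2 :: W2) (by simp) (by simp)
          (fun x hx => hPf x (List.mem_cons_of_mem _ hx))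
          (fun x hx => hWf x (List.mem_cons_of_mem _ hx))
        rw [hpre2]
        constructor
        · rintro ⟨rfl, W', hW', hne⟩
          exact ⟨W', by rw [hW']; simp, hne⟩
        · rintro ⟨W', hW', hne⟩
          have h1 : w = p ∧ w2 :: W2 = p2 :: P2 ++ W' := by
            simp only [List.cons_append] at hW'
            injection hW' with ha hb
            exact ⟨ha, by simpa using hb⟩
          exact ⟨h1.1.symm, W', h1.2, hne⟩

theorem reverse_join (W : List (List Char)) :
    (PySem.Chars.join [' '] W).reverse
      = PySem.Chars.join [' '] ((W.map List.reverse).reverse) := by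
  induction W with
  | nil => simp [PySem.Chars.join, List.intercalate]
  | cons w W ih =>
    cases W with
    | nil => simp [PySem.Chars.join_singleton]
    | cons w2 W2 =>
      rw [PySem.Chars.join_cons_cons]
      simp only [List.map_cons, List.reverse_cons]
      have e3 : (List.map List.reverse W2).reverse ++ [w2.reverse] ++ [w.reverse]
          = ((w2 :: W2).map List.reverse).reverse ++ [w.reverse] := by simp
      rw [e3, join_append (((w2 :: W2).map List.reverse).reverse) [w.reverse] (by simp) (by simp),
        PySem.Chars.join_singleton]
      rw [List.reverse_append, List.reverse_append, ih]
      simp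

theorem exists_drop_iff (P W : List (List Char)) :
    (∃ W', W = P ++ W' ∧ W' ≠ []) ↔ (W.take P.length = P ∧ P.length < W.length) := by
  constructor
  · rintro ⟨W', rfl, hne⟩
    constructor
    · simp
    · simp [List.length_append]
      exact List.length_pos_of_ne_nil hne
  · rintro ⟨h1, h2⟩
    refine ⟨W.drop P.length, ?_, ?_⟩
    · conv_lhs => rw [← List.take_append_drop P.length W]
      rw [h1]
    · intro hd
      have := List.length_drop (l := W) (i := P.length)
      rw [hd] at this
      simp at this
      omega

theorem endswith_words (Q W : List (List Char)) (hQ : Q ≠ []) (hW : W ≠ [])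
    (hQf : ∀ w ∈ Q, ' ' ∉ w) (hWf : ∀ w ∈ W, ' ' ∉ w) :
    ((' ' :: PySem.Chars.join [' '] Q) <:+ PySem.Chars.join [' '] W
      ↔ ∃ W', W = W' ++ Q ∧ W' ≠ []) := by
  rw [← List.reverse_prefix]
  have e1 : (' ' :: PySem.Chars.join [' '] Q).reverse
      = PySem.Chars.join [' '] ((Q.map List.reverse).reverse) ++ [' '] := by
    rw [List.reverse_cons, reverse_join]
  rw [e1, reverse_join W,
    startswith_words ((Q.map List.reverse).reverse) ((W.map List.reverse).reverse)
      (by simp [hQ]) (by simp [hW])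
      (by intro w hw; simp only [List.mem_reverse, List.mem_map] at hw
          obtain ⟨q, hq, rfl⟩ := hw; simpa using hQf q hq)
      (by intro w hw; simp only [List.mem_reverse, List.mem_map] at hw
          obtain ⟨q, hq, rfl⟩ := hw; simpa using hWf q hq)]
  constructor
  · rintro ⟨V, hV, hne⟩
    refine ⟨(V.reverse).map List.reverse, ?_, by simp [hne]⟩
    have := congrArg List.reverse hV
    simp only [List.reverse_reverse, List.reverse_append] at this
    have := congrArg (List.map List.reverse) this
    simp only [List.map_append, List.map_map] at this
    simpa [List.map_map, Function.comp] using this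
  · rintro ⟨W', rfl, hne⟩
    refine ⟨(W'.map List.reverse).reverse, by simp, by simp [hne]⟩

theorem slice_5_neg6 (xs : List Char) (h : 11 ≤ xs.length) :
    PySem.List.slice xs (some 5) (some (-6)) = (xs.drop 5).take (xs.length - 11) := by
  have h5 : PySem.List.clampIdx xs.length 5 = 5 := by
    simp only [PySem.List.clampIdx, List.length_cons]
    split_ifs <;> (try simp) <;> omega
  have h6 : PySem.List.clampIdx xs.length (-6) = xs.length - 6 := by
    simp only [PySem.List.clampIdx, List.length_cons]
    split_ifs <;> (try simp) <;> omega
  simp only [PySem.List.slice, h5, h6]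
  have e : xs.length - 6 - 5 = xs.length - 11 := by omega
  rw [e]

theorem slice_1_4 {α : Type} (w : α) (l : List α) :
    PySem.List.slice (w :: l) (some 1) (some 4) = l.take 3 := by
  have h1 : PySem.List.clampIdx (w :: l).length 1 = 1 := by
    simp only [PySem.List.clampIdx, List.length_cons]
    split_ifs <;> (try simp) <;> omega
  have h4 : PySem.List.clampIdx (w :: l).length 4 = min 4 (l.length + 1) := by
    simp only [PySem.List.clampIdx, List.length_cons]
    split_ifs <;> (try simp) <;> omega
  simp only [PySem.List.slice, h1, h4, List.drop_succ_cons, List.drop_zero]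
  rcases Nat.le_total 3 l.length with hl | hl
  · have e : min 4 (l.length + 1) - 1 = 3 := by omega
    rw [e]
  · rw [List.take_of_length_le (by omega), List.take_of_length_le (by omega)]

theorem slice_1_3 {α : Type} (w : α) (l : List α) :
    PySem.List.slice (w :: l) (some 1) (some 3) = l.take 2 := by
  have h1 : PySem.List.clampIdx (w :: l).length 1 = 1 := by
    simp only [PySem.List.clampIdx, List.length_cons]
    split_ifs <;> (try simp) <;> omega
  have h4 : PySem.List.clampIdx (w :: l).length 3 = min 3 (l.length + 1) := by
    simp only [PySem.List.clampIdx, List.length_cons]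
    split_ifs <;> (try simp) <;> omega
  simp only [PySem.List.slice, h1, h4, List.drop_succ_cons, List.drop_zero]
  rcases Nat.le_total 2 l.length with hl | hl
  · have e : min 3 (l.length + 1) - 1 = 2 := by omega
    rw [e]
  · rw [List.take_of_length_le (by omega), List.take_of_length_le (by omega)]

theorem slice_1_neg1 {α : Type} (w : α) (l : List α) :
    PySem.List.slice (w :: l) (some 1) (some (-1)) = l.dropLast := by
  have h1 : PySem.List.clampIdx (w :: l).length 1 = 1 := by
    simp only [PySem.List.clampIdx, List.length_cons]
    split_ifs <;> (try simp) <;> omega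
  have h2 : PySem.List.clampIdx (w :: l).length (-1) = l.length := by
    simp only [PySem.List.clampIdx, List.length_cons]
    split_ifs <;> (try simp) <;> omega
  simp only [PySem.List.slice, h1, h2, List.drop_succ_cons, List.drop_zero]
  rw [List.dropLast_eq_take]

theorem slice_from_nat {α : Type} (xs : List α) (n : Nat) :
    PySem.List.slice xs (some (n : Int)) none = xs.drop n := by
  rw [PySem.List.slice_from xs (by positivity)]
  simp

theorem pyGetD_zero {α : Type} (w : α) (l : List α) (d : α) :
    PySem.List.pyGetD (w :: l) 0 d = w := by
  simp [PySem.List.pyGetD, PySem.List.pyGet?, PySem.List.pyIdx?]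

theorem pyGetD_neg_one {α : Type} (w : α) (l : List α) (d : α) :
    PySem.List.pyGetD (w :: l) (-1) d = (w :: l).getLast (by simp) := by
  have hi : PySem.List.pyIdx? (w :: l).length (-1) = some l.length := by
    simp only [PySem.List.pyIdx?, List.length_cons]
    split_ifs <;> (try simp) <;> omega
  simp only [PySem.List.pyGetD, PySem.List.pyGet?, hi, Option.bind_some]
  rw [List.getLast_eq_getElem]
  simp
  rfl

theorem slice_4_neg6 (xs : List Char) (h : 10 ≤ xs.length) :
    PySem.List.slice xs (some 4) (some (-6)) = (xs.drop 4).take (xs.length - 10) := by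
  have h4 : PySem.List.clampIdx xs.length 4 = 4 := by
    simp only [PySem.List.clampIdx, List.length_cons]
    split_ifs <;> (try simp) <;> omega
  have h6 : PySem.List.clampIdx xs.length (-6) = xs.length - 6 := by
    simp only [PySem.List.clampIdx, List.length_cons]
    split_ifs <;> (try simp) <;> omega
  simp only [PySem.List.slice, h4, h6]
  have e : xs.length - 6 - 4 = xs.length - 10 := by omega
  rw [e]

theorem slice_from_3 {α : Type} (xs : List α) :
    PySem.List.slice xs (some 3) none = xs.drop 3 := by
  rw [PySem.List.slice_from xs (by norm_num)]
  simp

theorem slice_from_4 {α : Type} (xs : List α) :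
    PySem.List.slice xs (some 4) none = xs.drop 4 := by
  rw [PySem.List.slice_from xs (by norm_num)]
  simp

theorem bool_eq_false {b : Bool} {P : Prop} (h : b = true ↔ P) (hn : ¬ P) : b = false := by
  cases b
  · rfl
  · exact absurd (h.mp rfl) hn

theorem team_not_prefix_opp (x : List Char) : ¬ (wTeam <+: wOpp ++ x) := by
  simp [wTeam, wOpp, List.cons_prefix_cons]

theorem core (f : List Char) : prettyA_body f = prettyB_body f := by
  obtain ⟨w0, W1, hW⟩ : ∃ w0 W1, splitSp f = w0 :: W1 := by
    cases h : splitSp f with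
    | nil => exact absurd h (splitSp_ne_nil f)
    | cons a l => exact ⟨a, l, rfl⟩
  have hfree : ∀ w ∈ w0 :: W1, ' ' ∉ w := by rw [← hW]; exact mem_splitSp_no_space f
  have hJ : PySem.Chars.join [' '] (w0 :: W1) = f := by rw [← hW]; exact join_splitSp f
  have hws : (PySem.Chars.split? f [' ']).getD [] = w0 :: W1 := by
    simp [PySem.Chars.split?, splitOn_space, hW]
  -- characterisation of "feat.startswith(word + ' ')"
  have hsingle : ∀ p : List Char, ' ' ∉ p →
      (PySem.Chars.startswith f (p ++ [' ']) = true ↔ (w0 = p ∧ W1 ≠ [])) := by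
    intro p hp
    rw [PySem.Chars.startswith_iff,
      show p ++ [' '] = PySem.Chars.join [' '] [p] ++ [' '] by rw [PySem.Chars.join_singleton],
      ← hJ, startswith_words [p] (w0 :: W1) (by simp) (by simp) (by simpa using hp) hfree]
    constructor
    · rintro ⟨W', hE, hne⟩
      rw [List.singleton_append] at hE
      injection hE with h1 h2
      exact ⟨h1, h2 ▸ hne⟩
    · rintro ⟨rfl, hne⟩; exact ⟨W1, rfl, hne⟩
  -- characterisation of "feat.startswith(a + ' ' + b + ' ' + c + ' ')"
  have htriple : ∀ (a b c : List Char), ' ' ∉ a → ' ' ∉ b → ' ' ∉ c →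
      (PySem.Chars.startswith f (a ++ [' '] ++ b ++ [' '] ++ c ++ [' ']) = true ↔
        (w0 = a ∧ W1.take 2 = [b, c] ∧ 2 < W1.length)) := by
    intro a b c ha hb hc
    have hj3 : a ++ [' '] ++ b ++ [' '] ++ c ++ [' ']
        = PySem.Chars.join [' '] [a, b, c] ++ [' '] := by
      rw [PySem.Chars.join_cons_cons, PySem.Chars.join_cons_cons, PySem.Chars.join_singleton]
      simp
    rw [PySem.Chars.startswith_iff, hj3, ← hJ,
      startswith_words [a, b, c] (w0 :: W1) (by simp) (by simp)
        (by intro w hw; simp only [List.mem_cons, List.not_mem_nil, or_false] at hw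
            rcases hw with rfl | rfl | rfl <;> assumption) hfree,
      exists_drop_iff]
    simp only [List.length_cons, List.length_nil, List.length_singleton]
    constructor
    · rintro ⟨h1, h2⟩
      rw [show (0+1+1+1 : Nat) = 2+1 by rfl, List.take_succ_cons] at h1
      injection h1 with h1a h1b
      exact ⟨h1a, h1b, by omega⟩
    · rintro ⟨rfl, h2, h3⟩
      refine ⟨?_, by omega⟩
      rw [show (0+1+1+1 : Nat) = 2+1 by rfl, List.take_succ_cons, h2]
  have hquad : ∀ (a b c d : List Char), ' ' ∉ a → ' ' ∉ b → ' ' ∉ c → ' ' ∉ d →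
      (PySem.Chars.startswith f (a ++ [' '] ++ b ++ [' '] ++ c ++ [' '] ++ d ++ [' ']) = true ↔
        (w0 = a ∧ W1.take 3 = [b, c, d] ∧ 3 < W1.length)) := by
    intro a b c d ha hb hc hd
    have hj4 : a ++ [' '] ++ b ++ [' '] ++ c ++ [' '] ++ d ++ [' ']
        = PySem.Chars.join [' '] [a, b, c, d] ++ [' '] := by
      rw [PySem.Chars.join_cons_cons, PySem.Chars.join_cons_cons, PySem.Chars.join_cons_cons,
        PySem.Chars.join_singleton]
      simp
    rw [PySem.Chars.startswith_iff, hj4, ← hJ,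
      startswith_words [a, b, c, d] (w0 :: W1) (by simp) (by simp)
        (by intro w hw; simp only [List.mem_cons, List.not_mem_nil, or_false] at hw
            rcases hw with rfl | rfl | rfl | rfl <;> assumption) hfree,
      exists_drop_iff]
    simp only [List.length_cons, List.length_nil, List.length_singleton]
    constructor
    · rintro ⟨h1, h2⟩
      rw [show (0+1+1+1+1 : Nat) = 3+1 by rfl, List.take_succ_cons] at h1
      injection h1 with h1a h1b
      exact ⟨h1a, h1b, by omega⟩
    · rintro ⟨rfl, h2, h3⟩
      refine ⟨?_, by omega⟩
      rw [show (0+1+1+1+1 : Nat) = 3+1 by rfl, List.take_succ_cons, h2]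
  have hend : PySem.Chars.endswith f ([' '] ++ wCount) = true ↔ ∃ q, W1 = q ++ [wCount] := by
    rw [PySem.Chars.endswith_iff,
      show ([' '] ++ wCount : List Char) = ' ' :: PySem.Chars.join [' '] [wCount] by
        rw [PySem.Chars.join_singleton]; rfl,
      ← hJ, endswith_words [wCount] (w0 :: W1) (by simp) (by simp) (by decide) hfree]
    constructor
    · rintro ⟨W', hE, hne⟩
      cases W' with
      | nil => exact absurd rfl hne
      | cons a q =>
        rw [List.cons_append] at hE
        injection hE with h1 h2
        exact ⟨q, h2⟩
    · rintro ⟨q, rfl⟩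
      exact ⟨w0 :: q, by simp, by simp⟩
  -- B-side slice lemmas spezialised
  have hBc1 : (PySem.List.slice (w0 :: W1) (some 1) (some 4) = [wSupport, wNorm, wLevel]
      ∧ 4 < (w0 :: W1).length) ↔ (W1.take 3 = [wSupport, wNorm, wLevel] ∧ 3 < W1.length) := by
    rw [slice_1_4, List.length_cons]
    constructor <;> rintro ⟨x, y⟩ <;> exact ⟨x, by omega⟩
  have hBc2 : (PySem.List.slice (w0 :: W1) (some 1) (some 3) = [wNorm, wLevel]
      ∧ 3 < (w0 :: W1).length) ↔ (W1.take 2 = [wNorm, wLevel] ∧ 2 < W1.length) := by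
    rw [slice_1_3, List.length_cons]
    constructor <;> rintro ⟨x, y⟩ <;> exact ⟨x, by omega⟩
  have hBc3 : (1 < (w0 :: W1).length ∧ PySem.List.pyGetD (w0 :: W1) (-1) [] = wCount)
      ↔ ∃ q, W1 = q ++ [wCount] := by
    constructor
    · rintro ⟨h1, h2⟩
      have hne : W1 ≠ [] := by
        intro h; subst h; simp at h1
      rw [pyGetD_neg_one, List.getLast_cons hne] at h2
      exact ⟨W1.dropLast, by rw [← h2]; exact (List.dropLast_append_getLast hne).symm⟩
    · rintro ⟨q, rfl⟩
      refine ⟨by simp, ?_⟩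
      rw [pyGetD_neg_one, List.getLast_cons (by simp), List.getLast_concat]
  have hTake2of3 : W1.take 3 = [wSupport, wNorm, wLevel] → W1.take 2 = [wSupport, wNorm] := by
    intro h3
    have := congrArg (List.take 2) h3
    rw [List.take_take] at this
    simpa using this
  by_cases hT : w0 = wTeam
  · subst hT
    by_cases hSNL3 : W1.take 3 = [wSupport, wNorm, wLevel] ∧ 3 < W1.length
    · -- team support norm level …
      have hb1 : PySem.Chars.startswith f (wTeam ++ [' '] ++ wNorm ++ [' '] ++ wLevel ++ [' ']) = false :=
        bool_eq_false (htriple wTeam wNorm wLevel (by decide) (by decide) (by decide))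
          (by rintro ⟨-, h2, -⟩
              rw [hTake2of3 hSNL3.1] at h2
              exact absurd h2 (by decide))
      have hb2 : PySem.Chars.startswith f (wOpp ++ [' '] ++ wNorm ++ [' '] ++ wLevel ++ [' ']) = false :=
        bool_eq_false (htriple wOpp wNorm wLevel (by decide) (by decide) (by decide))
          (by rintro ⟨h0, -⟩; exact absurd h0 (by decide))
      have hb3 : PySem.Chars.startswith f (wTeam ++ [' '] ++ wSupport ++ [' '] ++ wNorm ++ [' '] ++ wLevel ++ [' ']) = true :=
        (hquad wTeam wSupport wNorm wLevel (by decide) (by decide) (by decide) (by decide)).mpr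
          ⟨rfl, hSNL3.1, hSNL3.2⟩
      have hr : W1.drop 3 ≠ [] := by
        intro h
        have := congrArg List.length h
        simp at this
        omega
      have hW1d : W1 = [wSupport, wNorm, wLevel] ++ W1.drop 3 := by
        have h := List.take_append_drop 3 W1
        rw [hSNL3.1] at h
        exact h.symm
      have hf : f = wTeam ++ [' '] ++ wSupport ++ [' '] ++ wNorm ++ [' '] ++ wLevel ++ [' ']
          ++ PySem.Chars.join [' '] (W1.drop 3) := by
        rw [← hJ]
        conv_lhs => rw [hW1d]
        rw [show (wTeam :: ([wSupport, wNorm, wLevel] ++ W1.drop 3))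
            = ([wTeam, wSupport, wNorm, wLevel] ++ W1.drop 3) from rfl,
          join_append [wTeam, wSupport, wNorm, wLevel] _ (by simp) hr,
          PySem.Chars.join_cons_cons, PySem.Chars.join_cons_cons, PySem.Chars.join_cons_cons,
          PySem.Chars.join_singleton]
        simp [List.append_assoc]
      have hcard : PySem.Chars.slice f
          (some (PySem.Chars.len (wTeam ++ [' '] ++ wSupport ++ [' '] ++ wNorm ++ [' '] ++ wLevel ++ [' ']))) none
          = PySem.Chars.join [' '] (W1.drop 3) := by
        rw [show PySem.Chars.len (wTeam ++ [' '] ++ wSupport ++ [' '] ++ wNorm ++ [' '] ++ wLevel ++ [' '])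
            = ((24 : Nat) : Int) from by decide,
          PySem.Chars.slice_eq_listSlice, slice_from_nat, hf]
        exact List.drop_left' (by decide)
      have hside : PySem.Chars.startswith f wTeam = true := by
        rw [PySem.Chars.startswith_iff, hf]
        simp only [List.append_assoc]
        exact List.prefix_append _ _
      have hBcond : PySem.List.slice (wTeam :: W1) (some 1) (some 4) = [wSupport, wNorm, wLevel]
          ∧ 4 < (wTeam :: W1).length := hBc1.mpr hSNL3
      rw [show prettyA_body f = prettyA_hit1 f
          (wTeam ++ [' '] ++ wSupport ++ [' '] ++ wNorm ++ [' '] ++ wLevel ++ [' ']) from by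
        simp only [prettyA_body, prettyA_loop1, hb1, hb2, hb3]
        simp]
      rw [show prettyB_body f = prettyB_rest (wTeam :: W1) ['Y', 'o', 'u'] from by
        simp only [prettyB_body, hws, pyGetD_zero]
        simp]
      rw [prettyB_rest, if_pos hBcond]
      rw [prettyA_hit1]
      simp only [hcard, hside,
        show PySem.Chars.isIn wSupport
            (wTeam ++ [' '] ++ wSupport ++ [' '] ++ wNorm ++ [' '] ++ wLevel ++ [' ']) = true
          from by decide,
        slice_from_4, show (4 : Nat) = 3 + 1 from rfl, List.drop_succ_cons]
      simp [List.append_assoc]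
    · by_cases hNL2 : W1.take 2 = [wNorm, wLevel] ∧ 2 < W1.length
      · -- team norm level …
        have hb1 : PySem.Chars.startswith f (wTeam ++ [' '] ++ wNorm ++ [' '] ++ wLevel ++ [' ']) = true :=
          (htriple wTeam wNorm wLevel (by decide) (by decide) (by decide)).mpr ⟨rfl, hNL2.1, hNL2.2⟩
        have hr : W1.drop 2 ≠ [] := by
          intro h
          have := congrArg List.length h
          simp at this
          omega
        have hW1d : W1 = [wNorm, wLevel] ++ W1.drop 2 := by
          have h := List.take_append_drop 2 W1
          rw [hNL2.1] at h
          exact h.symm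
        have hf : f = wTeam ++ [' '] ++ wNorm ++ [' '] ++ wLevel ++ [' ']
            ++ PySem.Chars.join [' '] (W1.drop 2) := by
          rw [← hJ]
          conv_lhs => rw [hW1d]
          rw [show (wTeam :: ([wNorm, wLevel] ++ W1.drop 2))
              = ([wTeam, wNorm, wLevel] ++ W1.drop 2) from rfl,
            join_append [wTeam, wNorm, wLevel] _ (by simp) hr,
            PySem.Chars.join_cons_cons, PySem.Chars.join_cons_cons, PySem.Chars.join_singleton]
          simp [List.append_assoc]
        have hcard : PySem.Chars.slice f
            (some (PySem.Chars.len (wTeam ++ [' '] ++ wNorm ++ [' '] ++ wLevel ++ [' ']))) none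
            = PySem.Chars.join [' '] (W1.drop 2) := by
          rw [show PySem.Chars.len (wTeam ++ [' '] ++ wNorm ++ [' '] ++ wLevel ++ [' '])
              = ((16 : Nat) : Int) from by decide,
            PySem.Chars.slice_eq_listSlice, slice_from_nat, hf]
          exact List.drop_left' (by decide)
        have hside : PySem.Chars.startswith f wTeam = true := by
          rw [PySem.Chars.startswith_iff, hf]
          simp only [List.append_assoc]
          exact List.prefix_append _ _
        rw [show prettyA_body f = prettyA_hit1 f
            (wTeam ++ [' '] ++ wNorm ++ [' '] ++ wLevel ++ [' ']) from by
          simp only [prettyA_body, prettyA_loop1, hb1]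
          simp]
        rw [show prettyB_body f = prettyB_rest (wTeam :: W1) ['Y', 'o', 'u'] from by
          simp only [prettyB_body, hws, pyGetD_zero]
          simp]
        rw [prettyB_rest, if_neg (fun hc => hSNL3 (hBc1.mp hc)), if_pos (hBc2.mpr hNL2)]
        rw [prettyA_hit1]
        simp only [hcard, hside,
          show PySem.Chars.isIn wSupport
              (wTeam ++ [' '] ++ wNorm ++ [' '] ++ wLevel ++ [' ']) = false
            from by decide,
          slice_from_3, show (3 : Nat) = 2 + 1 from rfl, List.drop_succ_cons]
        simp [List.append_assoc]
      · -- no norm-level prefix: maybe the count branch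
        have hb1 : PySem.Chars.startswith f (wTeam ++ [' '] ++ wNorm ++ [' '] ++ wLevel ++ [' ']) = false :=
          bool_eq_false (htriple wTeam wNorm wLevel (by decide) (by decide) (by decide))
            (by rintro ⟨-, h2, h3⟩; exact hNL2 ⟨h2, h3⟩)
        have hb2 : PySem.Chars.startswith f (wOpp ++ [' '] ++ wNorm ++ [' '] ++ wLevel ++ [' ']) = false :=
          bool_eq_false (htriple wOpp wNorm wLevel (by decide) (by decide) (by decide))
            (by rintro ⟨h0, -⟩; exact absurd h0 (by decide))
        have hb3 : PySem.Chars.startswith f (wTeam ++ [' '] ++ wSupport ++ [' '] ++ wNorm ++ [' '] ++ wLevel ++ [' ']) = false :=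
          bool_eq_false (hquad wTeam wSupport wNorm wLevel (by decide) (by decide) (by decide) (by decide))
            (by rintro ⟨-, h2, h3⟩; exact hSNL3 ⟨h2, h3⟩)
        have hb4 : PySem.Chars.startswith f (wOpp ++ [' '] ++ wSupport ++ [' '] ++ wNorm ++ [' '] ++ wLevel ++ [' ']) = false :=
          bool_eq_false (hquad wOpp wSupport wNorm wLevel (by decide) (by decide) (by decide) (by decide))
            (by rintro ⟨h0, -⟩; exact absurd h0 (by decide))
        have hbO : PySem.Chars.startswith f (wOpp ++ [' ']) = false :=
          bool_eq_false (hsingle wOpp (by decide)) (by rintro ⟨h0, -⟩; exact absurd h0 (by decide))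
        by_cases hCNT : ∃ q, W1 = q ++ [wCount]
        · obtain ⟨q, hq⟩ := hCNT
          have hne : W1 ≠ [] := by rw [hq]; simp
          have hbT : PySem.Chars.startswith f (wTeam ++ [' ']) = true :=
            (hsingle wTeam (by decide)).mpr ⟨rfl, hne⟩
          have hbE : PySem.Chars.endswith f ([' '] ++ wCount) = true := hend.mpr ⟨q, hq⟩
          rw [show prettyA_body f = prettyA_hit2 f (wTeam ++ [' ']) from by
            simp only [prettyA_body, prettyA_loop1, prettyA_loop2, hb1, hb2, hb3, hb4, hbT, hbE]
            simp]
          rw [show prettyB_body f = prettyB_rest (wTeam :: W1) ['Y', 'o', 'u'] from by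
            simp only [prettyB_body, hws, pyGetD_zero]
            simp]
          rw [prettyB_rest, if_neg (fun hc => hSNL3 (hBc1.mp hc)),
            if_neg (fun hc => hNL2 (hBc2.mp hc)), if_pos (hBc3.mpr ⟨q, hq⟩)]
          rw [prettyA_hit2, if_pos rfl]
          rw [show PySem.Chars.len (wTeam ++ [' ']) = ((5 : Nat) : Int) from by decide]
          rw [slice_1_neg1, hq, List.dropLast_concat]
          cases q with
          | nil =>
            have hf : f = wTeam ++ [' '] ++ wCount := by
              rw [← hJ, hq]
              simp only [List.nil_append]
              rw [PySem.Chars.join_cons_cons, PySem.Chars.join_singleton]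
            rw [show PySem.Chars.slice f (some ((5 : Nat) : Int)) (some (-6)) = [] from by
              rw [hf]; decide]
            rw [show PySem.Chars.join [' '] [] = [] from rfl]
          | cons a q' =>
            have hqne : (a :: q') ≠ ([] : List (List Char)) := by simp
            have hf : f = (wTeam ++ [' ']) ++ (PySem.Chars.join [' '] (a :: q') ++ ' ' :: wCount) := by
              rw [← hJ, show (wTeam :: W1) = ([wTeam] ++ W1) from rfl,
                join_append [wTeam] W1 (by simp) hne, PySem.Chars.join_singleton, hq,
                join_append (a :: q') [wCount] hqne (by simp), PySem.Chars.join_singleton]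
              simp
            have hlen : f.length = (PySem.Chars.join [' '] (a :: q')).length + 11 := by
              rw [hf]
              simp [wTeam, wCount]
            rw [PySem.Chars.slice_eq_listSlice,
              show ((5 : Nat) : Int) = (5 : Int) from rfl,
              slice_5_neg6 f (by omega), hlen]
            have hdrop : f.drop 5 = PySem.Chars.join [' '] (a :: q') ++ ' ' :: wCount := by
              rw [hf]
              exact List.drop_left' (by decide)
            rw [hdrop, Nat.add_sub_cancel, List.take_left' rfl]
        · -- fallback: A returns f, B returns the re-join
          have hbE : PySem.Chars.endswith f ([' '] ++ wCount) = false :=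
            bool_eq_false hend hCNT
          rw [show prettyA_body f = f from by
            simp only [prettyA_body, prettyA_loop1, prettyA_loop2, hb1, hb2, hb3, hb4, hbO, hbE]
            simp]
          rw [show prettyB_body f = prettyB_rest (wTeam :: W1) ['Y', 'o', 'u'] from by
            simp only [prettyB_body, hws, pyGetD_zero]
            simp]
          rw [prettyB_rest, if_neg (fun hc => hSNL3 (hBc1.mp hc)),
            if_neg (fun hc => hNL2 (hBc2.mp hc)), if_neg (fun hc => hCNT (hBc3.mp hc)), hJ]
  · by_cases hO : w0 = wOpp
    · subst hO
      have hBwrap : prettyB_body f = prettyB_rest (wOpp :: W1) ['O', 'p', 'p'] := by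
        simp only [prettyB_body, hws, pyGetD_zero]
        simp
        intro h
        exact absurd h (by decide)
      by_cases hSNL3 : W1.take 3 = [wSupport, wNorm, wLevel] ∧ 3 < W1.length
      · have hb1 : PySem.Chars.startswith f (wTeam ++ [' '] ++ wNorm ++ [' '] ++ wLevel ++ [' ']) = false :=
          bool_eq_false (htriple wTeam wNorm wLevel (by decide) (by decide) (by decide))
            (by rintro ⟨h0, -⟩; exact absurd h0 (by decide))
        have hb2 : PySem.Chars.startswith f (wOpp ++ [' '] ++ wNorm ++ [' '] ++ wLevel ++ [' ']) = false :=
          bool_eq_false (htriple wOpp wNorm wLevel (by decide) (by decide) (by decide))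
            (by rintro ⟨-, h2, -⟩
                rw [hTake2of3 hSNL3.1] at h2
                exact absurd h2 (by decide))
        have hb3 : PySem.Chars.startswith f (wTeam ++ [' '] ++ wSupport ++ [' '] ++ wNorm ++ [' '] ++ wLevel ++ [' ']) = false :=
          bool_eq_false (hquad wTeam wSupport wNorm wLevel (by decide) (by decide) (by decide) (by decide))
            (by rintro ⟨h0, -⟩; exact absurd h0 (by decide))
        have hb4 : PySem.Chars.startswith f (wOpp ++ [' '] ++ wSupport ++ [' '] ++ wNorm ++ [' '] ++ wLevel ++ [' ']) = true :=
          (hquad wOpp wSupport wNorm wLevel (by decide) (by decide) (by decide) (by decide)).mpr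
            ⟨rfl, hSNL3.1, hSNL3.2⟩
        have hr : W1.drop 3 ≠ [] := by
          intro h
          have := congrArg List.length h
          simp at this
          omega
        have hW1d : W1 = [wSupport, wNorm, wLevel] ++ W1.drop 3 := by
          have h := List.take_append_drop 3 W1
          rw [hSNL3.1] at h
          exact h.symm
        have hf : f = wOpp ++ [' '] ++ wSupport ++ [' '] ++ wNorm ++ [' '] ++ wLevel ++ [' ']
            ++ PySem.Chars.join [' '] (W1.drop 3) := by
          rw [← hJ]
          conv_lhs => rw [hW1d]
          rw [show (wOpp :: ([wSupport, wNorm, wLevel] ++ W1.drop 3))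
              = ([wOpp, wSupport, wNorm, wLevel] ++ W1.drop 3) from rfl,
            join_append [wOpp, wSupport, wNorm, wLevel] _ (by simp) hr,
            PySem.Chars.join_cons_cons, PySem.Chars.join_cons_cons, PySem.Chars.join_cons_cons,
            PySem.Chars.join_singleton]
          simp [List.append_assoc]
        have hcard : PySem.Chars.slice f
            (some (PySem.Chars.len (wOpp ++ [' '] ++ wSupport ++ [' '] ++ wNorm ++ [' '] ++ wLevel ++ [' ']))) none
            = PySem.Chars.join [' '] (W1.drop 3) := by
          rw [show PySem.Chars.len (wOpp ++ [' '] ++ wSupport ++ [' '] ++ wNorm ++ [' '] ++ wLevel ++ [' '])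
              = ((23 : Nat) : Int) from by decide,
            PySem.Chars.slice_eq_listSlice, slice_from_nat, hf]
          exact List.drop_left' (by decide)
        have hside : PySem.Chars.startswith f wTeam = false :=
          bool_eq_false (PySem.Chars.startswith_iff f wTeam)
            (by intro hpre
                rw [hf] at hpre
                simp only [List.append_assoc] at hpre
                exact team_not_prefix_opp _ hpre)
        rw [show prettyA_body f = prettyA_hit1 f
            (wOpp ++ [' '] ++ wSupport ++ [' '] ++ wNorm ++ [' '] ++ wLevel ++ [' ']) from by
          simp only [prettyA_body, prettyA_loop1, hb1, hb2, hb3, hb4]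
          simp]
        rw [hBwrap, prettyB_rest, if_pos (hBc1.mpr hSNL3)]
        rw [prettyA_hit1]
        simp only [hcard, hside,
          show PySem.Chars.isIn wSupport
              (wOpp ++ [' '] ++ wSupport ++ [' '] ++ wNorm ++ [' '] ++ wLevel ++ [' ']) = true
            from by decide,
          slice_from_4, show (4 : Nat) = 3 + 1 from rfl, List.drop_succ_cons]
        simp [List.append_assoc]
      · by_cases hNL2 : W1.take 2 = [wNorm, wLevel] ∧ 2 < W1.length
        · have hb1 : PySem.Chars.startswith f (wTeam ++ [' '] ++ wNorm ++ [' '] ++ wLevel ++ [' ']) = false :=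
            bool_eq_false (htriple wTeam wNorm wLevel (by decide) (by decide) (by decide))
              (by rintro ⟨h0, -⟩; exact absurd h0 (by decide))
          have hb2 : PySem.Chars.startswith f (wOpp ++ [' '] ++ wNorm ++ [' '] ++ wLevel ++ [' ']) = true :=
            (htriple wOpp wNorm wLevel (by decide) (by decide) (by decide)).mpr ⟨rfl, hNL2.1, hNL2.2⟩
          have hr : W1.drop 2 ≠ [] := by
            intro h
            have := congrArg List.length h
            simp at this
            omega
          have hW1d : W1 = [wNorm, wLevel] ++ W1.drop 2 := by
            have h := List.take_append_drop 2 W1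
            rw [hNL2.1] at h
            exact h.symm
          have hf : f = wOpp ++ [' '] ++ wNorm ++ [' '] ++ wLevel ++ [' ']
              ++ PySem.Chars.join [' '] (W1.drop 2) := by
            rw [← hJ]
            conv_lhs => rw [hW1d]
            rw [show (wOpp :: ([wNorm, wLevel] ++ W1.drop 2))
                = ([wOpp, wNorm, wLevel] ++ W1.drop 2) from rfl,
              join_append [wOpp, wNorm, wLevel] _ (by simp) hr,
              PySem.Chars.join_cons_cons, PySem.Chars.join_cons_cons, PySem.Chars.join_singleton]
            simp [List.append_assoc]
          have hcard : PySem.Chars.slice f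
              (some (PySem.Chars.len (wOpp ++ [' '] ++ wNorm ++ [' '] ++ wLevel ++ [' ']))) none
              = PySem.Chars.join [' '] (W1.drop 2) := by
            rw [show PySem.Chars.len (wOpp ++ [' '] ++ wNorm ++ [' '] ++ wLevel ++ [' '])
                = ((15 : Nat) : Int) from by decide,
              PySem.Chars.slice_eq_listSlice, slice_from_nat, hf]
            exact List.drop_left' (by decide)
          have hside : PySem.Chars.startswith f wTeam = false :=
            bool_eq_false (PySem.Chars.startswith_iff f wTeam)
              (by intro hpre
                  rw [hf] at hpre
                  simp only [List.append_assoc] at hpre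
                  exact team_not_prefix_opp _ hpre)
          rw [show prettyA_body f = prettyA_hit1 f
              (wOpp ++ [' '] ++ wNorm ++ [' '] ++ wLevel ++ [' ']) from by
            simp only [prettyA_body, prettyA_loop1, hb1, hb2]
            simp]
          rw [hBwrap, prettyB_rest, if_neg (fun hc => hSNL3 (hBc1.mp hc)), if_pos (hBc2.mpr hNL2)]
          rw [prettyA_hit1]
          simp only [hcard, hside,
            show PySem.Chars.isIn wSupport
                (wOpp ++ [' '] ++ wNorm ++ [' '] ++ wLevel ++ [' ']) = false
              from by decide,
            slice_from_3, show (3 : Nat) = 2 + 1 from rfl, List.drop_succ_cons]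
          simp [List.append_assoc]
        · have hb1 : PySem.Chars.startswith f (wTeam ++ [' '] ++ wNorm ++ [' '] ++ wLevel ++ [' ']) = false :=
            bool_eq_false (htriple wTeam wNorm wLevel (by decide) (by decide) (by decide))
              (by rintro ⟨h0, -⟩; exact absurd h0 (by decide))
          have hb2 : PySem.Chars.startswith f (wOpp ++ [' '] ++ wNorm ++ [' '] ++ wLevel ++ [' ']) = false :=
            bool_eq_false (htriple wOpp wNorm wLevel (by decide) (by decide) (by decide))
              (by rintro ⟨-, h2, h3⟩; exact hNL2 ⟨h2, h3⟩)
          have hb3 : PySem.Chars.startswith f (wTeam ++ [' '] ++ wSupport ++ [' '] ++ wNorm ++ [' '] ++ wLevel ++ [' ']) = false :=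
            bool_eq_false (hquad wTeam wSupport wNorm wLevel (by decide) (by decide) (by decide) (by decide))
              (by rintro ⟨h0, -⟩; exact absurd h0 (by decide))
          have hb4 : PySem.Chars.startswith f (wOpp ++ [' '] ++ wSupport ++ [' '] ++ wNorm ++ [' '] ++ wLevel ++ [' ']) = false :=
            bool_eq_false (hquad wOpp wSupport wNorm wLevel (by decide) (by decide) (by decide) (by decide))
              (by rintro ⟨-, h2, h3⟩; exact hSNL3 ⟨h2, h3⟩)
          have hbT : PySem.Chars.startswith f (wTeam ++ [' ']) = false :=
            bool_eq_false (hsingle wTeam (by decide)) (by rintro ⟨h0, -⟩; exact absurd h0 (by decide))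
          by_cases hCNT : ∃ q, W1 = q ++ [wCount]
          · obtain ⟨q, hq⟩ := hCNT
            have hne : W1 ≠ [] := by rw [hq]; simp
            have hbO : PySem.Chars.startswith f (wOpp ++ [' ']) = true :=
              (hsingle wOpp (by decide)).mpr ⟨rfl, hne⟩
            have hbE : PySem.Chars.endswith f ([' '] ++ wCount) = true := hend.mpr ⟨q, hq⟩
            rw [show prettyA_body f = prettyA_hit2 f (wOpp ++ [' ']) from by
              simp only [prettyA_body, prettyA_loop1, prettyA_loop2, hb1, hb2, hb3, hb4, hbT, hbO, hbE]
              simp]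
            rw [hBwrap, prettyB_rest, if_neg (fun hc => hSNL3 (hBc1.mp hc)),
              if_neg (fun hc => hNL2 (hBc2.mp hc)), if_pos (hBc3.mpr ⟨q, hq⟩)]
            rw [prettyA_hit2, if_neg (by decide)]
            rw [show PySem.Chars.len (wOpp ++ [' ']) = ((4 : Nat) : Int) from by decide]
            rw [slice_1_neg1, hq, List.dropLast_concat]
            cases q with
            | nil =>
              have hf : f = wOpp ++ [' '] ++ wCount := by
                rw [← hJ, hq]
                simp only [List.nil_append]
                rw [PySem.Chars.join_cons_cons, PySem.Chars.join_singleton]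
              rw [show PySem.Chars.slice f (some ((4 : Nat) : Int)) (some (-6)) = [] from by
                rw [hf]; decide]
              rw [show PySem.Chars.join [' '] [] = [] from rfl]
            | cons a q' =>
              have hqne : (a :: q') ≠ ([] : List (List Char)) := by simp
              have hf : f = (wOpp ++ [' ']) ++ (PySem.Chars.join [' '] (a :: q') ++ ' ' :: wCount) := by
                rw [← hJ, show (wOpp :: W1) = ([wOpp] ++ W1) from rfl,
                  join_append [wOpp] W1 (by simp) hne, PySem.Chars.join_singleton, hq,
                  join_append (a :: q') [wCount] hqne (by simp), PySem.Chars.join_singleton]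
                simp
              have hlen : f.length = (PySem.Chars.join [' '] (a :: q')).length + 10 := by
                rw [hf]
                simp [wOpp, wCount]
              rw [PySem.Chars.slice_eq_listSlice,
                show ((4 : Nat) : Int) = (4 : Int) from rfl,
                slice_4_neg6 f (by omega), hlen]
              have hdrop : f.drop 4 = PySem.Chars.join [' '] (a :: q') ++ ' ' :: wCount := by
                rw [hf]
                exact List.drop_left' (by decide)
              rw [hdrop, Nat.add_sub_cancel, List.take_left' rfl]
          · have hbE : PySem.Chars.endswith f ([' '] ++ wCount) = false :=
              bool_eq_false hend hCNT
            rw [show prettyA_body f = f from by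
              simp only [prettyA_body, prettyA_loop1, prettyA_loop2, hb1, hb2, hb3, hb4, hbT, hbE]
              simp]
            rw [hBwrap, prettyB_rest, if_neg (fun hc => hSNL3 (hBc1.mp hc)),
              if_neg (fun hc => hNL2 (hBc2.mp hc)), if_neg (fun hc => hCNT (hBc3.mp hc)), hJ]
    · -- neither team nor opp: both fall through
      have hb1 : PySem.Chars.startswith f (wTeam ++ [' '] ++ wNorm ++ [' '] ++ wLevel ++ [' ']) = false :=
        bool_eq_false (htriple wTeam wNorm wLevel (by decide) (by decide) (by decide))
          (by rintro ⟨h0, -⟩; exact hT h0)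
      have hb2 : PySem.Chars.startswith f (wOpp ++ [' '] ++ wNorm ++ [' '] ++ wLevel ++ [' ']) = false :=
        bool_eq_false (htriple wOpp wNorm wLevel (by decide) (by decide) (by decide))
          (by rintro ⟨h0, -⟩; exact hO h0)
      have hb3 : PySem.Chars.startswith f (wTeam ++ [' '] ++ wSupport ++ [' '] ++ wNorm ++ [' '] ++ wLevel ++ [' ']) = false :=
        bool_eq_false (hquad wTeam wSupport wNorm wLevel (by decide) (by decide) (by decide) (by decide))
          (by rintro ⟨h0, -⟩; exact hT h0)
      have hb4 : PySem.Chars.startswith f (wOpp ++ [' '] ++ wSupport ++ [' '] ++ wNorm ++ [' '] ++ wLevel ++ [' ']) = false :=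
        bool_eq_false (hquad wOpp wSupport wNorm wLevel (by decide) (by decide) (by decide) (by decide))
          (by rintro ⟨h0, -⟩; exact hO h0)
      have hbT : PySem.Chars.startswith f (wTeam ++ [' ']) = false :=
        bool_eq_false (hsingle wTeam (by decide)) (by rintro ⟨h0, -⟩; exact hT h0)
      have hbO : PySem.Chars.startswith f (wOpp ++ [' ']) = false :=
        bool_eq_false (hsingle wOpp (by decide)) (by rintro ⟨h0, -⟩; exact hO h0)
      rw [show prettyA_body f = f from by
        simp only [prettyA_body, prettyA_loop1, prettyA_loop2, hb1, hb2, hb3, hb4, hbT, hbO]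
        simp]
      rw [show prettyB_body f = PySem.Chars.join [' '] (w0 :: W1) from by
        simp only [prettyB_body, hws, pyGetD_zero]
        rw [if_neg hT, if_neg hO]]
      rw [hJ]

-- ===== VERDICT (by name: the statement is the Claim_ definition above) =====
theorem pretty_feature_name_py_spec : Claim_equal_pretty_feature_name_py := by
  intro feat _
  unfold Spec_pretty_feature_name_py pretty_feature_name_py pretty_feature_name_py_alt
  exact congrArg String.ofList (core _)
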